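-- pv_equiv track=rewrite | github.com/onflow/tidal-protocol-research | sim_tests/balanced_scenario_monte_carlo.py | _aggregate_trading_activity_data
-- ===== SOURCE A (Python) =====
-- def _aggregate_trading_activity_data(trading_activity_data):
--     """Aggregate trading activity data across runs"""
--     if not trading_activity_data:
--         return {}
--
--     aggregated = {
--         "total_yield_token_trades": 0,
--         "total_rebalancing_events": 0,
--         "total_liquidation_events": 0,
--         "total_trade_events": 0
--     }
--
--     for trading_data in trading_activity_data:
--         aggregated["total_yield_token_trades"] += len(trading_data.get("yield_token_trades", []))
--         aggregated["total_rebalancing_events"] += len(trading_data.get("rebalancing_events", []))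
--         aggregated["total_liquidation_events"] += len(trading_data.get("liquidation_events", []))
--         aggregated["total_trade_events"] += len(trading_data.get("trade_events", []))
--
--     return aggregated
-- ===== SOURCE B (Python) =====
-- def _aggregate_trading_activity_data(trading_activity_data):
--     """Aggregate trading activity data across runs (key-major transposition)."""
--     if not trading_activity_data:
--         return {}
--     key_map = {
--         "total_yield_token_trades": "yield_token_trades",
--         "total_rebalancing_events": "rebalancing_events",
--         "total_liquidation_events": "liquidation_events",
--         "total_trade_events": "trade_events",
--     }
--     return {out_key: sum(len(td.get(in_key, [])) for td in trading_activity_data)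
--             for out_key, in_key in key_map.items()}
-- ===== Notes on version B (the rewrite author's own statement) =====
-- stated objective: idiomatic
-- what changed: Replaces the run-major loop over a shared mutable accumulator dict with a key-major dict comprehension: for each output field, sum the lengths across runs in one pass; the loop nesting is transposed and no accumulator dict is updated.
import Mathlib
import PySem

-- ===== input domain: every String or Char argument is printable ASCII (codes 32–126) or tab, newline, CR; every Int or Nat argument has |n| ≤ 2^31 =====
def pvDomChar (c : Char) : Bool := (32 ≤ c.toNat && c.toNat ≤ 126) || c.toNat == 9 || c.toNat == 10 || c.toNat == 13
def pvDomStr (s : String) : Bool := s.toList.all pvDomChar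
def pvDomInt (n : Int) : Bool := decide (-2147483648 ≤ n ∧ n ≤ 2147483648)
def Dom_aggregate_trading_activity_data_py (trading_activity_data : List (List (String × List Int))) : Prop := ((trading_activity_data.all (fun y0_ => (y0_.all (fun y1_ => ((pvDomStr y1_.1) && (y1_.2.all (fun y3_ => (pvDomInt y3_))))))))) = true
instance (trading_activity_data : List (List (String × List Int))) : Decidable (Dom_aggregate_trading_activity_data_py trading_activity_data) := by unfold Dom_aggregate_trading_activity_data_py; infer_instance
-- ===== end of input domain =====

-- B transposes A's run-major accumulator loop into a key-major comprehension (idiomatic; same cost).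

-- ===== PORT A =====
-- one iteration of A's `for trading_data in trading_activity_data` body
def pvStepA (agg : PySem.Dict String Int) (td : List (String × List Int)) : PySem.Dict String Int :=
  let tdd := PySem.Dict.mk td
  let agg := agg.modify "total_yield_token_trades" 0 (· + ((tdd.getD "yield_token_trades" []).length : Int))
  let agg := agg.modify "total_rebalancing_events" 0 (· + ((tdd.getD "rebalancing_events" []).length : Int))
  let agg := agg.modify "total_liquidation_events" 0 (· + ((tdd.getD "liquidation_events" []).length : Int))
  agg.modify "total_trade_events" 0 (· + ((tdd.getD "trade_events" []).length : Int))

def aggregate_trading_activity_data_py (trading_activity_data : List (List (String × List Int))) : List (String × Int) :=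
  if trading_activity_data = [] then []
  else
    let aggregated : PySem.Dict String Int := PySem.Dict.ofList
      [("total_yield_token_trades", 0), ("total_rebalancing_events", 0),
       ("total_liquidation_events", 0), ("total_trade_events", 0)]
    (trading_activity_data.foldl pvStepA aggregated).items

-- ===== PORT B =====
def pvKeyMap : List (String × String) :=
  [("total_yield_token_trades", "yield_token_trades"),
   ("total_rebalancing_events", "rebalancing_events"),
   ("total_liquidation_events", "liquidation_events"),
   ("total_trade_events", "trade_events")]

def aggregate_trading_activity_data_py_alt (trading_activity_data : List (List (String × List Int))) : List (String × Int) :=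
  if trading_activity_data = [] then []
  else pvKeyMap.map (fun p =>
    (p.1, (trading_activity_data.map (fun td => (((PySem.Dict.mk td).getD p.2 []).length : Int))).sum))

-- ===== PRECONDITION & SPEC =====
def Spec_aggregate_trading_activity_data_py (trading_activity_data : List (List (String × List Int))) (out : List (String × Int)) : Prop := out = aggregate_trading_activity_data_py_alt trading_activity_data
instance (trading_activity_data : List (List (String × List Int))) (out : List (String × Int)) : Decidable (Spec_aggregate_trading_activity_data_py trading_activity_data out) := by unfold Spec_aggregate_trading_activity_data_py; infer_instance

-- ===== CLAIM (what is proved, stated in full; the proofs are below) =====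
def Claim_equal_aggregate_trading_activity_data_py : Prop := ∀ (trading_activity_data : List (List (String × List Int))), Dom_aggregate_trading_activity_data_py trading_activity_data → Spec_aggregate_trading_activity_data_py trading_activity_data (aggregate_trading_activity_data_py trading_activity_data)

-- ===== LEMMAS AND PROOFS =====
-- the four-counter accumulator dict A's loop maintains
def pvMkD (a b c d : Int) : PySem.Dict String Int :=
  PySem.Dict.mk [("total_yield_token_trades", a), ("total_rebalancing_events", b),
                 ("total_liquidation_events", c), ("total_trade_events", d)]

def pvLen (k : String) (td : List (String × List Int)) : Int :=
  (((PySem.Dict.mk td).getD k []).length : Int)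

theorem pvStepA_mkD (a b c d : Int) (td : List (String × List Int)) :
    pvStepA (pvMkD a b c d) td =
      pvMkD (a + pvLen "yield_token_trades" td) (b + pvLen "rebalancing_events" td)
            (c + pvLen "liquidation_events" td) (d + pvLen "trade_events" td) := by
  simp [pvStepA, pvMkD, pvLen, PySem.Dict.modify, PySem.Dict.get?, PySem.Dict.insert,
        PySem.Dict.contains, PySem.Dict.getD]

theorem pvFoldA (l : List (List (String × List Int))) (a b c d : Int) :
    (l.foldl pvStepA (pvMkD a b c d)).items =
      [("total_yield_token_trades", a + (l.map (pvLen "yield_token_trades")).sum),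
       ("total_rebalancing_events", b + (l.map (pvLen "rebalancing_events")).sum),
       ("total_liquidation_events", c + (l.map (pvLen "liquidation_events")).sum),
       ("total_trade_events", d + (l.map (pvLen "trade_events")).sum)] := by
  induction l generalizing a b c d with
  | nil => simp [pvMkD]
  | cons td rest ih =>
      simp only [List.foldl_cons, pvStepA_mkD, ih, List.map_cons, List.sum_cons]
      ring_nf

-- ===== VERDICT (by name: the statement is the Claim_ definition above) =====
theorem aggregate_trading_activity_data_py_spec : Claim_equal_aggregate_trading_activity_data_py := by
  intro l _
  unfold Spec_aggregate_trading_activity_data_py aggregate_trading_activity_data_py aggregate_trading_activity_data_py_alt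
  by_cases h : l = []
  · simp [h]
  · have : PySem.Dict.ofList
        [("total_yield_token_trades", (0:Int)), ("total_rebalancing_events", 0),
         ("total_liquidation_events", 0), ("total_trade_events", 0)] = pvMkD 0 0 0 0 := by decide
    simp only [h, this, pvFoldA, pvKeyMap, List.map_cons, List.map_nil, zero_add]
    rfl
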